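-- pv_equiv track=rewrite | github.com/alexandraback/datacollection | solutions_5640146288377856_1/Python/minus9d/a.py | lastone
-- ===== SOURCE A (Python) =====
-- def lastone(C,W):
--     ans = 0
--     while not W <= C <= 2*W-1:
--         ans += 1
--         C -= W
--     if C == W:
--         ans += W
--     else:
--         ans += W + 1
--
--     return ans
-- ===== SOURCE B (Python) =====
-- def lastone(C, W):
--     # closed form: number of subtractions is C//W - 1; add W (exact multiple) or W+1.
--     q, r = divmod(C, W)
--     return q - 1 + W + (0 if r == 0 else 1)
-- ===== Notes on version B (the rewrite author's own statement) =====
-- stated objective: alternative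
-- what changed: replaced the repeated-subtraction loop by a single divmod: k = C//W - 1 subtractions in closed form, remainder decides the +W vs +W+1 branch
import Mathlib
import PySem

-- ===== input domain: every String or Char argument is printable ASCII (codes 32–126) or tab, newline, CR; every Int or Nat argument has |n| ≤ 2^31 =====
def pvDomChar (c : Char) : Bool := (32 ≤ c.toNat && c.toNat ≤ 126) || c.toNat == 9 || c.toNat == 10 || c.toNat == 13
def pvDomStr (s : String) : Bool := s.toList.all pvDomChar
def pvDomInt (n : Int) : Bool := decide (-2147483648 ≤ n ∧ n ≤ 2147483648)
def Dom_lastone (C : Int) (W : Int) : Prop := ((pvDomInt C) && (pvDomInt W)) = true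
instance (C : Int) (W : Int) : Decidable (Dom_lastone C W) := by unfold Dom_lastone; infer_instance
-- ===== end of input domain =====

-- B replaces A's repeated-subtraction loop by a closed-form floor-divmod (alternative algorithm).


-- ===== PORT A =====
-- literal port of A's while-loop; fuel only makes the recursion total
-- (inside Pre_ the fuel (C-W).toNat + 1 strictly exceeds the number of iterations)
def lastoneLoop (fuel : Nat) (C : Int) (W : Int) (ans : Int) : Int × Int :=
  match fuel with
  | 0 => (C, ans)
  | Nat.succ n =>
    if W ≤ C ∧ C ≤ 2 * W - 1 then (C, ans)
    else lastoneLoop n (C - W) W (ans + 1)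

def lastone (C : Int) (W : Int) : Int :=
  match lastoneLoop ((C - W).toNat + 1) C W 0 with
  | (C', ans) => if C' = W then ans + W else ans + W + 1

-- ===== PORT B =====
def lastone_alt (C : Int) (W : Int) : Int :=
  let q := PySem.Int.floordiv C W
  let r := PySem.Int.mod C W
  q - 1 + W + (if r = 0 then 0 else 1)

-- ===== PRECONDITION & SPEC =====
-- A's while-loop never terminates when W ≤ 0 or C < W; those inputs are excluded.
def Pre_lastone (C : Int) (W : Int) : Prop := 1 ≤ W ∧ W ≤ C
instance (C : Int) (W : Int) : Decidable (Pre_lastone C W) := by unfold Pre_lastone; infer_instance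
def pvWitness_lastone : Int × Int := (17, 5)

def Spec_lastone (C : Int) (W : Int) (out : Int) : Prop := out = lastone_alt C W
instance (C : Int) (W : Int) (out : Int) : Decidable (Spec_lastone C W out) := by unfold Spec_lastone; infer_instance

-- ===== CLAIM (what is proved, stated in full; the proofs are below) =====
def Claim_equal_lastone : Prop := ∀ (C : Int) (W : Int), Dom_lastone C W → Pre_lastone C W → Spec_lastone C W (lastone C W)

-- ===== LEMMAS AND PROOFS =====

-- the loop ends at (C % W + W, ans + (C / W - 1)) given enough fuel (ediv/emod; W > 0)
theorem lastoneLoop_eq (W : Int) (hW : 1 ≤ W) :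
    ∀ (fuel : Nat) (C ans : Int), W ≤ C → (C - W).toNat < fuel →
      lastoneLoop fuel C W ans = (C % W + W, ans + (C / W - 1)) := by
  intro fuel
  induction fuel with
  | zero => intro C ans _ h; omega
  | succ n ih =>
    intro C ans hC hf
    rw [lastoneLoop]
    by_cases hin : W ≤ C ∧ C ≤ 2 * W - 1
    · rw [if_pos hin]
      have hmod : C % W = C - W := by
        have h1 := Int.sub_emod_right C W
        have h2 : (C - W) % W = C - W := Int.emod_eq_of_lt (by omega) (by omega)
        omega
      have hdiv : C / W = 1 := by
        have h1 := Int.mul_ediv_add_emod C W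
        have h2 : W * (C / W) = W * 1 := by omega
        exact mul_left_cancel₀ (show (W : Int) ≠ 0 by omega) h2
      simp only [hmod, hdiv, Prod.mk.injEq]
      exact ⟨by ring, by ring⟩
    · rw [if_neg hin]
      have hC2 : W ≤ C - W := by omega
      have hrec := ih (C - W) (ans + 1) hC2 (by omega)
      rw [hrec]
      have hmod : (C - W) % W = C % W := by
        have := Int.sub_emod_right C W; omega
      have hdiv : (C - W) / W = C / W - 1 := by
        have h := Int.add_mul_ediv_right C (-1) (show W ≠ 0 by omega)
        have he : C + -1 * W = C - W := by ring
        rw [he] at h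
        omega
      rw [hmod, hdiv]
      exact Prod.ext rfl (by ring)

-- ===== VERDICT (by name: the statement is the Claim_ definition above) =====
theorem lastone_spec : Claim_equal_lastone := by
  intro C W _ hpre
  obtain ⟨hW, hC⟩ := hpre
  unfold Spec_lastone lastone lastone_alt
  rw [lastoneLoop_eq W hW _ C 0 hC (by omega)]
  have hfd : PySem.Int.floordiv C W = C / W := PySem.Int.floordiv_eq_ediv_of_pos (by omega)
  have hm : PySem.Int.mod C W = C % W := PySem.Int.mod_eq_emod_of_pos (by omega)
  have hmlt : C % W < W := Int.emod_lt_of_pos C (by omega)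
  have hmge : 0 ≤ C % W := Int.emod_nonneg C (by omega)
  simp only [hfd, hm]
  generalize C / W = q
  split_ifs <;> omega
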